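-- pv_equiv track=rewrite | github.com/smlfg/Aider_Bench_Harness | runner/metrics.py | unrelated_edits_present
-- ===== SOURCE A (Python) =====
-- def changed_files_from_patch(patch: str) -> list[str]:
--     files = []
--     for line in patch.splitlines():
--         if line.startswith("diff --git "):
--             parts = line.split()
--             if len(parts) >= 4:
--                 path = parts[2][2:] if parts[2].startswith("a/") else parts[2]
--                 files.append(path)
--     return files
--
-- def unrelated_edits_present(patch: str, expected_dirs: list[str] | None = None) -> bool:
--     """
--     Detect if patch contains edits outside expected directories.
--
--     Args:
--         patch: The git diff patch
--         expected_dirs: List of directory prefixes that are allowed.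
--                       If None, only CONVENTIONS.md is allowed as unrelated.
--     """
--     if not patch.strip():
--         return False
--
--     changed = changed_files_from_patch(patch)
--     if not expected_dirs:
--         return False
--
--     for path in changed:
--         if path == "CONVENTIONS.md":
--             continue
--         normalized = path.lstrip("/")
--         if not any(
--             normalized.startswith(d.lstrip("/")) or d == "*" for d in expected_dirs
--         ):
--             return True
--     return False
-- ===== SOURCE B (Python) =====
-- def unrelated_edits_present(patch: str, expected_dirs: list[str] | None = None) -> bool:
--     if not patch.strip():
--         return False
--     if not expected_dirs:
--         return False
--     # worklist of not-yet-justified changed paths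
--     pending = []
--     for line in patch.splitlines():
--         if line.startswith("diff --git "):
--             parts = line.split()
--             if len(parts) >= 4:
--                 path = parts[2].removeprefix("a/")
--                 if path != "CONVENTIONS.md":
--                     pending.append(path.lstrip("/"))
--     # prefix-major pass: each allowed dir discharges the paths it covers
--     for d in expected_dirs:
--         if not pending:
--             return False
--         if d == "*":
--             return False
--         prefix = d.lstrip("/")
--         pending = [p for p in pending if not p.startswith(prefix)]
--     return bool(pending)
-- ===== Notes on version B (the rewrite author's own statement) =====
-- stated objective: alternative
-- what changed: B inverts the loop nesting: instead of A's path-major scan (for each changed path, scan all allowed dirs), B builds a worklist of changed paths and then iterates prefix-major over the allowed dirs, each dir (or '*') filtering out the paths it covers, answering by whether the residual worklist is nonempty.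
import Mathlib
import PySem

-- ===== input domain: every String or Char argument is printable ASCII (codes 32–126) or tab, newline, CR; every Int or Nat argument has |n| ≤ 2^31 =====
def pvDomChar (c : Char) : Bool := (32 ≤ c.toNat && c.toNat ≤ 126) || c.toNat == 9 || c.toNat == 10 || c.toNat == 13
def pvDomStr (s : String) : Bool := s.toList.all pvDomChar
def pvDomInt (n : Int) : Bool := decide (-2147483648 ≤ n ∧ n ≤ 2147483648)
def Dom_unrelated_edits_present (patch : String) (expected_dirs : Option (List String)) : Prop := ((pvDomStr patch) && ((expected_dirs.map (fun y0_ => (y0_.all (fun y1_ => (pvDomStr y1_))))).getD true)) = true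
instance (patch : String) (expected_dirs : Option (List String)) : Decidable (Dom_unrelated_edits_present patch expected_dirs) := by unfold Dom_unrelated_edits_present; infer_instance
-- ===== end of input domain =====

-- B inverts the loop nesting: A scans path-major (every changed path against all allowed
-- dirs); B builds a worklist of changed paths and filters it prefix-major, one allowed dir
-- at a time, answering by whether the residual worklist is nonempty (alternative, same cost).

-- ===== PORT A =====
-- Python s.lstrip("/"): drop leading '/' characters (hand port, exact: lstrip with a
-- char set is dropWhile over the code points; both ports' sources call .lstrip("/")).
def pyLstripSlash (s : String) : String := String.ofList (s.toList.dropWhile (· == '/'))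

def changed_files_from_patch (patch : String) : List String :=
  (PySem.Str.splitlines patch).foldl
    (fun files line =>
      if PySem.Str.startswith line "diff --git " then
        let parts := PySem.Str.split₀ line
        if parts.length ≥ 4 then
          -- parts[2]: in range because parts.length ≥ 4
          let p2 := parts.getD 2 ""
          let path := if PySem.Str.startswith p2 "a/" then PySem.Str.slice p2 (some 2) none else p2
          files ++ [path]
        else files
      else files) []

def unrelated_edits_present (patch : String) (expected_dirs : Option (List String)) : Bool :=
  if PySem.Str.strip patch == "" then false
  else
    let changed := changed_files_from_patch patch
    let dirs := expected_dirs.getD []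
    if dirs.isEmpty then false   -- `if not expected_dirs`: None and [] both falsy
    else
      -- `for path in changed: … return True` / final `return False` = List.any
      changed.any (fun path =>
        if path == "CONVENTIONS.md" then false
        else
          let normalized := pyLstripSlash path
          !(dirs.any (fun d => PySem.Str.startswith normalized (pyLstripSlash d) || d == "*")))

-- ===== PORT B =====
-- Python s.removeprefix(pre) (hand port, exact): s[len(pre):] if s.startswith(pre) else s.
def pyRemovePrefix (s pre : String) : String :=
  if PySem.Str.startswith s pre then String.ofList (s.toList.drop pre.toList.length) else s

-- Source B's second loop: `for d in expected_dirs: …` over the pending worklist,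
-- with the two early `return False`s and the final `return bool(pending)`.
def pendingLoop : List String → List String → Bool
  | [], pending => !pending.isEmpty
  | d :: ds, pending =>
    if pending.isEmpty then false
    else if d == "*" then false
    else pendingLoop ds (pending.filter (fun p => !PySem.Str.startswith p (pyLstripSlash d)))

def unrelated_edits_present_alt (patch : String) (expected_dirs : Option (List String)) : Bool :=
  if PySem.Str.strip patch == "" then false
  else
    match expected_dirs with
    | none => false
    | some ds =>
      if ds.isEmpty then false
      else
        -- first loop: build the worklist of normalized changed paths
        let pending := (PySem.Str.splitlines patch).foldl
          (fun pend line =>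
            if PySem.Str.startswith line "diff --git " then
              let parts := PySem.Str.split₀ line
              if parts.length ≥ 4 then
                let path := pyRemovePrefix (parts.getD 2 "") "a/"
                if path == "CONVENTIONS.md" then pend
                else pend ++ [pyLstripSlash path]
              else pend
            else pend) []
        pendingLoop ds pending

-- ===== PRECONDITION & SPEC =====
def Spec_unrelated_edits_present (patch : String) (expected_dirs : Option (List String)) (out : Bool) : Prop := out = unrelated_edits_present_alt patch expected_dirs
instance (patch : String) (expected_dirs : Option (List String)) (out : Bool) : Decidable (Spec_unrelated_edits_present patch expected_dirs out) := by unfold Spec_unrelated_edits_present; infer_instance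

-- ===== CLAIM (what is proved, stated in full; the proofs are below) =====
def Claim_equal_unrelated_edits_present : Prop := ∀ (patch : String) (expected_dirs : Option (List String)), Dom_unrelated_edits_present patch expected_dirs → Spec_unrelated_edits_present patch expected_dirs (unrelated_edits_present patch expected_dirs)

-- ===== LEMMAS AND PROOFS =====

-- the prefix-major filtering loop computes the path-major `any`: order does not matter
theorem pendingLoop_eq_any (ds pending : List String) :
    pendingLoop ds pending =
      pending.any (fun p => !(ds.any (fun d => PySem.Str.startswith p (pyLstripSlash d) || d == "*"))) := by
  induction ds generalizing pending with
  | nil => cases pending <;> simp [pendingLoop]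
  | cons d ds ih =>
    by_cases hp : pending.isEmpty = true
    · rw [List.isEmpty_iff] at hp
      simp [pendingLoop, hp]
    · by_cases hw : (d == "*") = true
      · simp [pendingLoop, hp, hw]
      · simp only [pendingLoop, hp, hw, Bool.false_eq_true, if_false, ih, List.any_filter]
        apply PySem.List.any_congr_mem
        intro p _
        by_cases h1 : PySem.Str.startswith p (pyLstripSlash d) = true <;> simp [h1, hw] <;> simp [hw]

-- removeprefix "a/" is A's conditional slice
theorem removePrefix_eq (p2 : String) :
    pyRemovePrefix p2 "a/" =
      (if PySem.Str.startswith p2 "a/" then PySem.Str.slice p2 (some 2) none else p2) := by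
  unfold pyRemovePrefix
  split
  · congr 1
    rw [show ((2:Int)) = ((2:Nat):Int) from rfl]
    rw [PySem.Chars.slice_eq_listSlice, PySem.List.slice_from_natCast]
    rfl
  · rfl

theorem unrelated_edits_present_eq (patch : String) (expected_dirs : Option (List String)) :
    unrelated_edits_present patch expected_dirs = unrelated_edits_present_alt patch expected_dirs := by
  unfold unrelated_edits_present unrelated_edits_present_alt changed_files_from_patch
  by_cases hs : (PySem.Str.strip patch == "") = true
  · simp [hs]
  · simp only [hs]
    cases expected_dirs with
    | none => simp
    | some ds =>
      simp only [Option.getD_some]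
      by_cases hd : ds.isEmpty = true
      · simp [hd]
      · simp only [hd]
        rw [pendingLoop_eq_any]
        -- A's loop → flatMap
        rw [PySem.List.foldl_congr_mem (g := fun fs line => fs ++
              (if PySem.Str.startswith line "diff --git " = true then
                if (PySem.Str.split₀ line).length ≥ 4 then
                  [if PySem.Str.startswith ((PySem.Str.split₀ line).getD 2 "") "a/" = true then
                      PySem.Str.slice ((PySem.Str.split₀ line).getD 2 "") (some 2) none
                    else (PySem.Str.split₀ line).getD 2 ""]
                else []
              else []))
            (h := by
              intro acc x _
              dsimp only
              split <;> (try split) <;> simp)]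
        rw [PySem.List.foldl_append_eq_flatMap]
        -- B's loop → flatMap
        rw [PySem.List.foldl_congr_mem (g := fun pend line => pend ++
              (if PySem.Str.startswith line "diff --git " = true then
                if (PySem.Str.split₀ line).length ≥ 4 then
                  if pyRemovePrefix ((PySem.Str.split₀ line).getD 2 "") "a/" == "CONVENTIONS.md" then []
                  else [pyLstripSlash (pyRemovePrefix ((PySem.Str.split₀ line).getD 2 "") "a/")]
                else []
              else []))
            (h := by
              intro acc x _
              dsimp only
              split <;> (try split) <;> (try split) <;> simp)]
        rw [PySem.List.foldl_append_eq_flatMap]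
        simp only [List.nil_append, List.any_flatMap]
        apply PySem.List.any_congr_mem
        intro line _
        rw [removePrefix_eq]
        by_cases hc1 : PySem.Str.startswith line "diff --git " = true
        · by_cases hc2 : (PySem.Str.split₀ line).length ≥ 4
          · rw [if_pos hc1, if_pos hc1, if_pos hc2, if_pos hc2]
            set path := (if PySem.Str.startswith ((PySem.Str.split₀ line).getD 2 "") "a/" = true then
                PySem.Str.slice ((PySem.Str.split₀ line).getD 2 "") (some 2) none
              else (PySem.Str.split₀ line).getD 2 "") with hpath
            by_cases hcv : (path == "CONVENTIONS.md") = true <;> simp [hcv] <;> rw [beq_iff_eq] at hcv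
            · exact fun h => absurd hcv h
            · exact fun _ => hcv
          · rw [if_pos hc1, if_pos hc1, if_neg hc2, if_neg hc2]; rfl
        · rw [if_neg hc1, if_neg hc1]; rfl

-- ===== VERDICT (by name: the statement is the Claim_ definition above) =====
theorem unrelated_edits_present_spec : Claim_equal_unrelated_edits_present := by
  intro patch expected_dirs _
  exact unrelated_edits_present_eq patch expected_dirs
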